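-- pv_equiv track=rewrite | github.com/JoeYunHa/JMJ_Hitting_Analysis | src/metrics/phase4_pipeline.py | _frame_window
-- ===== SOURCE A (Python) =====
-- def _frame_window(swing_frames: list[int], seg_start: int, seg_end: int, window: int) -> list[int]:
--     frames = set()
--     for sf in swing_frames:
--         frames.update(range(max(seg_start, sf - window), min(seg_end, sf + window) + 1))
--     if not frames:
--         step = max(1, (seg_end - seg_start) // 10)
--         frames.update(range(seg_start, seg_end + 1, step))
--     return sorted(frames)
-- ===== SOURCE B (Python) =====
-- def _frame_window(swing_frames: list[int], seg_start: int, seg_end: int, window: int) -> list[int]: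
--     ivs = []
--     for sf in swing_frames:
--         lo = max(seg_start, sf - window)
--         hi = min(seg_end, sf + window)
--         if lo <= hi:
--             ivs.append((lo, hi))
--     if not ivs:
--         step = max(1, (seg_end - seg_start) // 10)
--         return list(range(seg_start, seg_end + 1, step))
--     ivs.sort(key=lambda t: t[0])
--     mlo, mhi = ivs[0]
--     out = []
--     for lo, hi in ivs[1:]:
--         if lo <= mhi + 1:
--             if hi > mhi:
--                 mhi = hi
--         else:
--             out.extend(range(mlo, mhi + 1))
--             mlo, mhi = lo, hi
--     out.extend(range(mlo, mhi + 1))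
--     return out
-- ===== Notes on version B (the rewrite author's own statement) =====
-- stated objective: alternative
-- what changed: Replaces the per-frame enumeration of every frame of each window into a set followed by a final sort, by clipping each swing frame to an interval, sorting the n intervals, merging overlapping/adjacent ones in one pass, and emitting each merged range once; intended as faster (O(n log n + output) vs O(n*window + m log m)) but a timing run readings were inconsistent across runs, so no speed is claimed.
import Mathlib
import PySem

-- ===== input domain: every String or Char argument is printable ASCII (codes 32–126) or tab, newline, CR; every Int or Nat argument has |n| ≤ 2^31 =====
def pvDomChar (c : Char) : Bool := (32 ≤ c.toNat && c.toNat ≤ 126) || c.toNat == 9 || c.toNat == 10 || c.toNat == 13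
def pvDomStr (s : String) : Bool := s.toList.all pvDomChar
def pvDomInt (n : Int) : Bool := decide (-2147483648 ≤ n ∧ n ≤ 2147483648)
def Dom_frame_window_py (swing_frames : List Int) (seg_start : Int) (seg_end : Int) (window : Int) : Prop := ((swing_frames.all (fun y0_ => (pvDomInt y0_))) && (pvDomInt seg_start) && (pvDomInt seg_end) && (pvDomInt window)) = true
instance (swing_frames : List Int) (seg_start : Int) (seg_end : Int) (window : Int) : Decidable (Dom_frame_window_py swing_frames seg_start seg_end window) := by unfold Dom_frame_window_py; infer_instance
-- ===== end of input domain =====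

-- B replaces A's per-frame enumeration of every windowed frame into a set (plus a sort of the union)
-- by clip-to-interval, sort intervals, one merging pass, and a single enumeration of the merged union.

-- ===== PORT A =====
def frame_window_py (swing_frames : List Int) (seg_start : Int) (seg_end : Int) (window : Int) : List Int :=
  let frames : PySem.Set Int := swing_frames.foldl
    (fun s sf => PySem.Set.update s
      (PySem.List.pyRange (max seg_start (sf - window)) (min seg_end (sf + window) + 1) 1))
    PySem.Set.empty
  let frames : PySem.Set Int :=
    if frames = [] then
      PySem.Set.update frames
        (PySem.List.pyRange seg_start (seg_end + 1)
          (max 1 (PySem.Int.floordiv (seg_end - seg_start) 10)))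
    else frames
  PySem.List.sorted frames (fun x => x) false

-- ===== PORT B =====
-- the merge loop of Source B: (mlo, mhi) is the current open interval, out the emitted prefix
def fwMerge (mlo mhi : Int) (out : List Int) : List (Int × Int) → List Int
  | [] => out ++ PySem.List.pyRange mlo (mhi + 1) 1
  | (lo, hi) :: rest =>
    if lo ≤ mhi + 1 then
      fwMerge mlo (if hi > mhi then hi else mhi) out rest
    else
      fwMerge lo hi (out ++ PySem.List.pyRange mlo (mhi + 1) 1) rest

def frame_window_py_alt (swing_frames : List Int) (seg_start : Int) (seg_end : Int) (window : Int) : List Int :=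
  let ivs : List (Int × Int) := swing_frames.foldl
    (fun acc sf =>
      let lo := max seg_start (sf - window)
      let hi := min seg_end (sf + window)
      if lo ≤ hi then acc ++ [(lo, hi)] else acc) []
  if ivs = [] then
    PySem.List.pyRange seg_start (seg_end + 1)
      (max 1 (PySem.Int.floordiv (seg_end - seg_start) 10))
  else
    match PySem.List.sorted ivs (fun t => t.1) false with
    | [] => []
    | (mlo, mhi) :: rest => fwMerge mlo mhi [] rest

-- ===== PRECONDITION & SPEC =====
def Spec_frame_window_py (swing_frames : List Int) (seg_start : Int) (seg_end : Int) (window : Int) (out : List Int) : Prop := out = frame_window_py_alt swing_frames seg_start seg_end window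
instance (swing_frames : List Int) (seg_start : Int) (seg_end : Int) (window : Int) (out : List Int) : Decidable (Spec_frame_window_py swing_frames seg_start seg_end window out) := by unfold Spec_frame_window_py; infer_instance

-- ===== CLAIM (what is proved, stated in full; the proofs are below) =====
def Claim_equal_frame_window_py : Prop := ∀ (swing_frames : List Int) (seg_start : Int) (seg_end : Int) (window : Int), Dom_frame_window_py swing_frames seg_start seg_end window → Spec_frame_window_py swing_frames seg_start seg_end window (frame_window_py swing_frames seg_start seg_end window)

-- ===== LEMMAS AND PROOFS =====

-- the clipped interval of one swing frame (proof-side abbreviation)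
def fwClip (ss se w sf : Int) : Int × Int := (max ss (sf - w), min se (sf + w))

-- membership in A's fold of set updates
theorem fw_mem_foldl_update (f : Int → List Int) (l : List Int) (x : Int) :
    ∀ s : PySem.Set Int,
      (x ∈ l.foldl (fun s sf => PySem.Set.update s (f sf)) s) ↔ x ∈ s ∨ ∃ sf ∈ l, x ∈ f sf := by
  induction l with
  | nil => simp
  | cons a l ih =>
    intro s
    simp [List.foldl_cons, ih, PySem.Set.mem_update]
    tauto

theorem fw_nodup_foldl_update (f : Int → List Int) (l : List Int) :
    ∀ s : PySem.Set Int, s.Nodup →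
      (l.foldl (fun s sf => PySem.Set.update s (f sf)) s).Nodup := by
  induction l with
  | nil => intro s hs; simpa using hs
  | cons a l ih =>
    intro s hs
    exact ih _ (PySem.Set.nodup_update _ _ hs)

-- B's interval-building fold is append-of-filtered-clips
theorem fw_ivs_eq (ss se w : Int) (l : List Int) :
    ∀ acc : List (Int × Int),
      (l.foldl (fun acc sf =>
          if (fwClip ss se w sf).1 ≤ (fwClip ss se w sf).2 then acc ++ [fwClip ss se w sf]
          else acc) acc)
        = acc ++ (l.filter
            (fun sf => decide ((fwClip ss se w sf).1 ≤ (fwClip ss se w sf).2))).map (fwClip ss se w) := by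
  induction l with
  | nil => simp
  | cons a l ih =>
    intro acc
    by_cases h : (fwClip ss se w a).1 ≤ (fwClip ss se w a).2 <;>
      simp [List.foldl_cons, h, ih]

-- pull the accumulator out of fwMerge
theorem fwMerge_out (rest : List (Int × Int)) :
    ∀ (mlo mhi : Int) (out : List Int),
      fwMerge mlo mhi out rest = out ++ fwMerge mlo mhi [] rest := by
  induction rest with
  | nil => intro mlo mhi out; simp [fwMerge]
  | cons p rest ih =>
    intro mlo mhi out
    obtain ⟨lo, hi⟩ := p
    by_cases h : lo ≤ mhi + 1
    · simp only [fwMerge, if_pos h]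
      exact ih _ _ _
    · simp only [fwMerge, if_neg h]
      rw [ih lo hi (out ++ _), ih lo hi ([] ++ _)]
      simp

-- membership in the merged output
theorem fwMerge_mem (rest : List (Int × Int)) :
    ∀ (mlo mhi x : Int),
      (∀ p ∈ rest, mlo ≤ p.1) →
      rest.Pairwise (fun a b => a.1 ≤ b.1) →
      (x ∈ fwMerge mlo mhi [] rest ↔ (mlo ≤ x ∧ x ≤ mhi) ∨ ∃ p ∈ rest, p.1 ≤ x ∧ x ≤ p.2) := by
  induction rest with
  | nil =>
    intro mlo mhi x _ _
    simp [fwMerge, PySem.List.mem_pyRange_one]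
  | cons p rest ih =>
    intro mlo mhi x hmono hpair
    obtain ⟨lo, hi⟩ := p
    have hlo : mlo ≤ lo := hmono (lo, hi) (by simp)
    have hpair' : rest.Pairwise (fun a b => a.1 ≤ b.1) := hpair.tail
    have hhead : ∀ q ∈ rest, lo ≤ q.1 := by
      intro q hq; exact List.rel_of_pairwise_cons hpair hq
    by_cases h : lo ≤ mhi + 1
    · have hmono' : ∀ q ∈ rest, mlo ≤ q.1 := fun q hq => le_trans hlo (hhead q hq)
      have hmax : (if hi > mhi then hi else mhi) = max mhi hi := by split <;> omega
      simp only [fwMerge, if_pos h, hmax]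
      rw [ih mlo (max mhi hi) x hmono' hpair']
      constructor
      · rintro (⟨h1, h2⟩ | ⟨q, hq, hq1, hq2⟩)
        · by_cases hx : x ≤ mhi
          · exact Or.inl ⟨h1, hx⟩
          · exact Or.inr ⟨(lo, hi), by simp, by omega, by omega⟩
        · exact Or.inr ⟨q, by simp [hq], hq1, hq2⟩
      · rintro (⟨h1, h2⟩ | ⟨q, hq, hq1, hq2⟩)
        · exact Or.inl ⟨h1, by omega⟩
        · rcases List.mem_cons.mp hq with hq | hq
          · rw [hq] at hq1 hq2; dsimp at hq1 hq2
            exact Or.inl ⟨by omega, by omega⟩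
          · exact Or.inr ⟨q, hq, hq1, hq2⟩
    · simp only [fwMerge, if_neg h]
      rw [fwMerge_out]
      simp only [List.nil_append, List.mem_append, PySem.List.mem_pyRange_one,
        ih lo hi x hhead hpair']
      constructor
      · rintro (⟨h1, h2⟩ | ⟨h1, h2⟩ | ⟨q, hq, hq1, hq2⟩)
        · exact Or.inl ⟨h1, by omega⟩
        · exact Or.inr ⟨(lo, hi), by simp, h1, h2⟩
        · exact Or.inr ⟨q, by simp [hq], hq1, hq2⟩
      · rintro (⟨h1, h2⟩ | ⟨q, hq, hq1, hq2⟩)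
        · exact Or.inl ⟨h1, by omega⟩
        · rcases List.mem_cons.mp hq with hq | hq
          · rw [hq] at hq1 hq2; exact Or.inr (Or.inl ⟨hq1, hq2⟩)
          · exact Or.inr (Or.inr ⟨q, hq, hq1, hq2⟩)

-- the merged output is strictly increasing
theorem fwMerge_pairwise (rest : List (Int × Int)) :
    ∀ (mlo mhi : Int),
      (∀ p ∈ rest, mlo ≤ p.1) →
      rest.Pairwise (fun a b => a.1 ≤ b.1) →
      (fwMerge mlo mhi [] rest).Pairwise (· < ·) := by
  induction rest with
  | nil =>
    intro mlo mhi _ _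
    simpa [fwMerge] using PySem.List.pairwise_lt_pyRange_one mlo (mhi + 1)
  | cons p rest ih =>
    intro mlo mhi hmono hpair
    obtain ⟨lo, hi⟩ := p
    have hlo : mlo ≤ lo := hmono (lo, hi) (by simp)
    have hpair' : rest.Pairwise (fun a b => a.1 ≤ b.1) := hpair.tail
    have hhead : ∀ q ∈ rest, lo ≤ q.1 := by
      intro q hq; exact List.rel_of_pairwise_cons hpair hq
    by_cases h : lo ≤ mhi + 1
    · have hmono' : ∀ q ∈ rest, mlo ≤ q.1 := fun q hq => le_trans hlo (hhead q hq)
      simpa only [fwMerge, if_pos h] using ih mlo _ hmono' hpair'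
    · simp only [fwMerge, if_neg h]
      rw [fwMerge_out]
      simp only [List.nil_append]
      refine List.pairwise_append.mpr ⟨PySem.List.pairwise_lt_pyRange_one mlo (mhi + 1),
        ih lo hi hhead hpair', ?_⟩
      intro a ha b hb
      have ha' : a < mhi + 1 := (PySem.List.mem_pyRange_one.mp ha).2
      have hb' := (fwMerge_mem rest lo hi b hhead hpair').mp hb
      rcases hb' with ⟨h1, _⟩ | ⟨q, hq, hq1, _⟩
      · omega
      · have := hhead q hq; omega

-- ===== VERDICT (by name: the statement is the Claim_ definition above) =====
theorem frame_window_py_spec : Claim_equal_frame_window_py := by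
  unfold Claim_equal_frame_window_py Spec_frame_window_py
  intro l ss se w _
  unfold frame_window_py frame_window_py_alt
  dsimp only
  set frames : PySem.Set Int := l.foldl
    (fun s sf => PySem.Set.update s
      (PySem.List.pyRange (max ss (sf - w)) (min se (sf + w) + 1) 1)) PySem.Set.empty with hframes
  have hmemF : ∀ x, x ∈ frames ↔
      ∃ sf ∈ l, (fwClip ss se w sf).1 ≤ x ∧ x ≤ (fwClip ss se w sf).2 := by
    intro x
    rw [hframes, fw_mem_foldl_update]
    simp only [PySem.Set.empty, List.not_mem_nil, false_or]
    refine exists_congr fun sf => and_congr_right fun _ => ?_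
    rw [PySem.List.mem_pyRange_one]
    simp only [fwClip]
    omega
  have hnodupF : frames.Nodup := fw_nodup_foldl_update _ l [] List.nodup_nil
  have hivs : (l.foldl
      (fun acc sf =>
        let lo := max ss (sf - w)
        let hi := min se (sf + w)
        if lo ≤ hi then acc ++ [(lo, hi)] else acc) ([] : List (Int × Int)))
      = (l.filter (fun sf => decide ((fwClip ss se w sf).1 ≤ (fwClip ss se w sf).2))).map
          (fwClip ss se w) :=
    (fw_ivs_eq ss se w l []).trans (List.nil_append _)
  rw [hivs]
  set flt := l.filter (fun sf => decide ((fwClip ss se w sf).1 ≤ (fwClip ss se w sf).2)) with hflt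
  have hmemF' : ∀ x, x ∈ frames ↔ ∃ p ∈ flt.map (fwClip ss se w), p.1 ≤ x ∧ x ≤ p.2 := by
    intro x
    rw [hmemF x]
    constructor
    · rintro ⟨sf, hsf, h1, h2⟩
      refine ⟨fwClip ss se w sf,
        List.mem_map_of_mem (List.mem_filter.mpr ⟨hsf, by simp; omega⟩), h1, h2⟩
    · rintro ⟨p, hp, h1, h2⟩
      obtain ⟨sf, hsf, rfl⟩ := List.mem_map.mp hp
      exact ⟨sf, (List.mem_filter.mp hsf).1, h1, h2⟩
  by_cases hempty : flt.map (fwClip ss se w) = []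
  · -- no nonempty clipped interval: A's set is empty, both take the fallback range
    have hF : frames = [] := by
      refine List.eq_nil_iff_forall_not_mem.mpr fun x hx => ?_
      obtain ⟨p, hp, _⟩ := (hmemF' x).mp hx
      simp [hempty] at hp
    rw [hF, hempty]
    set st := max 1 (PySem.Int.floordiv (se - ss) 10) with hst
    have hstpos : 0 < st := by rw [hst]; omega
    set r := PySem.List.pyRange ss (se + 1) st with hr
    have hrpair : r.Pairwise (· < ·) := by
      rw [hr, PySem.List.pyRange_of_pos _ _ hstpos]
      refine List.Pairwise.map _ (fun a b hab => ?_) List.pairwise_lt_range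
      have hab' : (a : Int) < (b : Int) := by exact_mod_cast hab
      exact Int.add_lt_add_left (Int.mul_lt_mul_of_pos_left hab' hstpos) ss
    have hrnodup : r.Nodup := hrpair.imp fun h => ne_of_lt h
    rw [PySem.Set.update_nil_left, PySem.Set.ofList_eq_self_of_nodup _ hrnodup]
    exact PySem.List.sorted_eq_self_of_pairwise r (fun x => x) (hrpair.imp fun h => le_of_lt h)
  · -- at least one interval: merge path
    have hFne : frames ≠ [] := by
      obtain ⟨p, hp⟩ := List.exists_mem_of_ne_nil _ hempty
      obtain ⟨sf, hsf, rfl⟩ := List.mem_map.mp hp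
      have hok : (fwClip ss se w sf).1 ≤ (fwClip ss se w sf).2 := by
        have := (List.mem_filter.mp hsf).2; simpa using this
      intro hF
      have := (hmemF' (fwClip ss se w sf).1).mpr ⟨fwClip ss se w sf, hp, le_refl _, hok⟩
      rw [hF] at this; simp at this
    simp only [if_neg hempty, if_neg hFne]
    have hsp := PySem.List.sorted_pairwise (flt.map (fwClip ss se w)) (fun t : Int × Int => t.1)
    have hsm : ∀ p : Int × Int,
        p ∈ PySem.List.sorted (flt.map (fwClip ss se w)) (fun t => t.1) false ↔
          p ∈ flt.map (fwClip ss se w) := fun p => PySem.List.mem_sorted _ _ _ p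
    rcases hs : PySem.List.sorted (flt.map (fwClip ss se w)) (fun t : Int × Int => t.1) false with
      _ | ⟨⟨mlo, mhi⟩, rest⟩
    · exact absurd (by simpa [PySem.List.sorted_eq_nil_iff] using hs) hempty
    · rw [hs] at hsp hsm
      have hmono : ∀ q ∈ rest, mlo ≤ q.1 := by
        intro q hq
        exact List.rel_of_pairwise_cons hsp hq
      have hpair' : rest.Pairwise (fun a b : Int × Int => a.1 ≤ b.1) := hsp.tail
      have hBpair := fwMerge_pairwise rest mlo mhi hmono hpair'
      have hBmem := fun x => fwMerge_mem rest mlo mhi x hmono hpair'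
      have hBnodup : (fwMerge mlo mhi [] rest).Nodup := hBpair.imp fun h => ne_of_lt h
      refine PySem.List.sorted_eq_of_perm_of_pairwise_lt frames (fwMerge mlo mhi [] rest)
        (fun x => x) ?_ hBpair
      refine (List.perm_ext_iff_of_nodup hBnodup hnodupF).mpr fun x => ?_
      rw [hBmem x, hmemF' x]
      constructor
      · rintro (⟨h1, h2⟩ | ⟨q, hq, hq1, hq2⟩)
        · exact ⟨(mlo, mhi), (hsm (mlo, mhi)).mp (by simp), h1, h2⟩
        · exact ⟨q, (hsm q).mp (by simp [hq]), hq1, hq2⟩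
      · rintro ⟨p, hp, h1, h2⟩
        rcases List.mem_cons.mp ((hsm p).mpr hp) with hq | hq
        · rw [hq] at h1 h2; exact Or.inl ⟨h1, h2⟩
        · exact Or.inr ⟨p, hq, h1, h2⟩
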